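-- pv_equiv track=rewrite | github.com/awslabs/quantum-computing-exploration-for-drug-discovery-on-aws | source/src/rna-folding/utility/ResultProcess.py | _parse_pseudoknot
-- ===== SOURCE A (Python) =====
-- def _parse_pseudoknot(ctList):
--     """
--     ctList              -- paired-bases: [(3, 8), (4, 7)]
--
--     Parse pseusoknots from clList
--     Return:
--         [ [(3, 8), (4, 7)], [(3, 8), (4, 7)], ... ]
--     """
--     ctList.sort(key=lambda x:x[0])
--     ctList = [ it for it in ctList if it[0]<it[1] ]
--     paired_bases = set()
--     for lb,rb in ctList:
--         paired_bases.add(lb)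
--         paired_bases.add(rb)
--
--     # Collect duplex
--     duplex = []
--     cur_duplex = [ ctList[0] ]
--     for i in range(1, len(ctList)):
--         bulge_paired = False
--         for li in range(ctList[i-1][0]+1, ctList[i][0]):
--             if li in paired_bases:
--                 bulge_paired = True
--                 break
--         if ctList[i][1]+1>ctList[i-1][1]:
--             bulge_paired = True
--         else:
--             for ri in range(ctList[i][1]+1, ctList[i-1][1]):
--                 if ri in paired_bases:
--                     bulge_paired = True
--                     break
--         if bulge_paired:
--             duplex.append(cur_duplex)
--             cur_duplex = [ ctList[i] ]
--         else:
--             cur_duplex.append(ctList[i])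
--     if cur_duplex:
--         duplex.append(cur_duplex)
--
--     # Discriminate duplex are pseudoknot
--     Len = len(duplex)
--     incompatible_duplex = []
--     for i in range(Len):
--         for j in range(i+1, Len):
--             bp1 = duplex[i][0]
--             bp2 = duplex[j][0]
--             if bp1[0]<bp2[0]<bp1[1]<bp2[1] or bp2[0]<bp1[0]<bp2[1]<bp1[1]:
--                 incompatible_duplex.append((i, j))
--
--     pseudo_found = []
--     while incompatible_duplex:
--         # count pseudo
--         count = {}
--         for l,r in incompatible_duplex:
--             count[l] = count.get(l,0)+1
--             count[r] = count.get(r,0)+1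
--
--         # find most possible pseudo
--         count = list(count.items())
--         count.sort( key=lambda x: (x[1],-len(duplex[x[0]])) )
--         possible_pseudo = count[-1][0]
--         pseudo_found.append(possible_pseudo)
--         i = 0
--         while i<len(incompatible_duplex):
--             l,r = incompatible_duplex[i]
--             if possible_pseudo in (l,r):
--                 del incompatible_duplex[i]
--             else:
--                 i += 1
--
--     pseudo_duplex = []
--     for i in pseudo_found:
--         pseudo_duplex.append(duplex[i])
--
--     return pseudo_duplex
-- ===== SOURCE B (Python) =====
-- def _crosses(nxt, prev, bp):
--     s1 = nxt.get(prev[0])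
--     s2 = nxt.get(bp[1])
--     return ((s1 is not None and s1 < bp[0])
--             or bp[1] + 1 > prev[1]
--             or (s2 is not None and s2 < prev[1]))
--
--
-- def _parse_pseudoknot(ctList):
--     ctList.sort(key=lambda x: x[0])
--     pairs = [it for it in ctList if it[0] < it[1]]
--     n = len(pairs)
--
--     # sorted distinct paired positions + successor map: each bulge test is a
--     # single successor lookup
--     pos = sorted({p for bp in pairs for p in bp})
--     nxt = dict(zip(pos, pos[1:]))
--
--     # duplexes = slices of `pairs` between break positions
--     breaks = [i for i in range(1, n) if _crosses(nxt, pairs[i - 1], pairs[i])]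
--     bounds = [0] + breaks + [n]
--     duplex = [pairs[a:b] for a, b in zip(bounds, bounds[1:])]
--
--     Len = len(duplex)
--     incompatible = [(i, j)
--                     for i in range(Len) for j in range(i + 1, Len)
--                     if duplex[i][0][0] < duplex[j][0][0] < duplex[i][0][1] < duplex[j][0][1]
--                     or duplex[j][0][0] < duplex[i][0][0] < duplex[j][0][1] < duplex[i][0][1]]
--
--     pseudo_found = []
--     while incompatible:
--         flat = [idx for pair in incompatible for idx in pair]
--         count = {}
--         for idx in flat:
--             count[idx] = count.get(idx, 0) + 1
--         # last key attaining the lexicographic maximum of (count, -duplex length)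
--         best = None
--         for idx, c in count.items():
--             key = (c, -len(duplex[idx]))
--             if best is None or best[1] <= key:
--                 best = (idx, key)
--         pseudo_found.append(best[0])
--         incompatible = [p for p in incompatible if best[0] not in p]
--
--     return [duplex[i] for i in pseudo_found]
-- ===== Notes on version B (the rewrite author's own statement) =====
-- stated objective: alternative
-- what changed: B answers each bulge test with a precomputed sorted-successor map lookup instead of A's per-integer membership scan over the gap, builds the duplexes as slices of the pair list between precomputed break indices instead of A's running-accumulator loop, and picks each round's pseudoknot by a one-pass last-arg-max over a counter built from the flattened pair list instead of A's per-round sort of the count table.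
import Mathlib
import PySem

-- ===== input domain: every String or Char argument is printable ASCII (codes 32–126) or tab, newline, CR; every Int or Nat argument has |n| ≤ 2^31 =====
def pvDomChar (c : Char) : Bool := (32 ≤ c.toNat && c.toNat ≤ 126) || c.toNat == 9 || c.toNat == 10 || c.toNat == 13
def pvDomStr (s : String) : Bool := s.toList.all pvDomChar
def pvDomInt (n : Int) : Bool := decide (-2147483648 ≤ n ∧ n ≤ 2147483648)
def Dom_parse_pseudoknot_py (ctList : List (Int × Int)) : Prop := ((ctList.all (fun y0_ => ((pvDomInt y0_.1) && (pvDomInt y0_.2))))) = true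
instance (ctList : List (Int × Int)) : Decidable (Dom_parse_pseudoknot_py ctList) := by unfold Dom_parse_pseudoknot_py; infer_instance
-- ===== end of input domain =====

-- B answers each bulge query with a precomputed sorted-successor map instead of A's per-integer
-- scan, builds the duplexes as slices between break indices instead of A's accumulator loop, and
-- picks each pseudoknot by a one-pass arg-max instead of sorting the count table; equivalence is
-- about the RETURN value — both the Python A and the Python B sort the caller's list in place.

-- ===== PORT A =====
-- A's `while incompatible_duplex:` loop: fuel = current list length (each round deletes at least
-- one pair, so this fuel is never exhausted before the list is empty).
def aWhile (duplex : List (List (Int × Int))) : Nat → List (Int × Int) → List Int → List Int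
  | 0, _, acc => acc
  | fuel+1, pairs, acc =>
    if pairs.isEmpty then acc else
    let count := pairs.foldl (fun d p =>
        let d1 := PySem.Dict.insert d p.1 (PySem.Dict.getD d p.1 0 + 1)
        PySem.Dict.insert d1 p.2 (PySem.Dict.getD d1 p.2 0 + 1)) (PySem.Dict.empty : PySem.Dict Int Int)
    let sortedItems := PySem.List.sorted2 count.items (fun x => x.2)
        (fun x => -((PySem.List.pyGetD duplex x.1 []).length : Int)) false
    let chosen := (PySem.List.pyGetD sortedItems (-1) (0, 0)).1
    aWhile duplex fuel (pairs.filter (fun p => !(p.1 == chosen || p.2 == chosen))) (acc ++ [chosen])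

def parse_pseudoknot_py (ctList : List (Int × Int)) : List (List (Int × Int)) :=
  let ct := (PySem.List.sorted ctList (fun x => x.1) false).filter (fun it => decide (it.1 < it.2))
  match ct with
  | [] => []   -- Python raises IndexError here (ctList[0]); excluded by Pre_
  | c0 :: _ =>
    let paired : PySem.Set Int :=
      ct.foldl (fun s p => PySem.Set.add (PySem.Set.add s p.1) p.2) PySem.Set.empty
    let res := (PySem.List.pyRange 1 (PySem.List.len ct) 1).foldl
      (fun (st : List (List (Int × Int)) × List (Int × Int)) (i : Int) =>
        let prev := PySem.List.pyGetD ct (i-1) (0, 0)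
        let cur := PySem.List.pyGetD ct i (0, 0)
        let bulge1 := (PySem.List.pyRange (prev.1+1) cur.1 1).any
          (fun li => PySem.Set.contains paired li)
        let bulge := if cur.2 + 1 > prev.2 then true
          else bulge1 || (PySem.List.pyRange (cur.2+1) prev.2 1).any
            (fun ri => PySem.Set.contains paired ri)
        if bulge then (st.1 ++ [st.2], [cur]) else (st.1, st.2 ++ [cur])) ([], [c0])
    let duplex := if res.2.isEmpty then res.1 else res.1 ++ [res.2]
    let Len : Int := PySem.List.len duplex
    let incompat := (PySem.List.pyRange 0 Len 1).foldl (fun acc i =>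
        (PySem.List.pyRange (i+1) Len 1).foldl (fun acc2 j =>
          let bp1 := PySem.List.pyGetD (PySem.List.pyGetD duplex i []) 0 (0, 0)
          let bp2 := PySem.List.pyGetD (PySem.List.pyGetD duplex j []) 0 (0, 0)
          if (bp1.1 < bp2.1 ∧ bp2.1 < bp1.2 ∧ bp1.2 < bp2.2) ∨
             (bp2.1 < bp1.1 ∧ bp1.1 < bp2.2 ∧ bp2.2 < bp1.2)
          then acc2 ++ [(i, j)] else acc2) acc) []
    let found := aWhile duplex incompat.length incompat []
    found.map (fun i => PySem.List.pyGetD duplex i [])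

-- ===== PORT B =====
-- Source B's `while incompatible:` loop, same fuel choice as aWhile; the per-round counter is built
-- from the flattened pair list and the winner is found by a single last-arg-max pass.
def bLoop (duplex : List (List (Int × Int))) : Nat → List (Int × Int) → List Int
  | 0, _ => []
  | fuel+1, pairs =>
    if pairs.isEmpty then [] else
    let flat := pairs.flatMap (fun p => [p.1, p.2])
    let count := flat.foldl (fun d x =>
        PySem.Dict.insert d x (PySem.Dict.getD d x 0 + 1)) (PySem.Dict.empty : PySem.Dict Int Int)
    let best := count.items.foldl (fun (b : Option (Int × (Int × Int))) (it : Int × Int) =>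
        let key : Int × Int := (it.2, -((PySem.List.pyGetD duplex it.1 []).length : Int))
        if b.all (fun bv => decide (bv.2.1 < key.1 ∨ (bv.2.1 = key.1 ∧ bv.2.2 ≤ key.2)))
        then some (it.1, key) else b) none
    match best with
    | none => []   -- unreachable: count is nonempty when pairs is
    | some bv => bv.1 :: bLoop duplex fuel (pairs.filter (fun p => !(p.1 == bv.1 || p.2 == bv.1)))

-- Source B's _crosses(nxt, prev, bp)
def bCrosses (nxt : PySem.Dict Int Int) (prev bp : Int × Int) : Bool :=
  (PySem.Dict.get? nxt prev.1).any (fun s => decide (s < bp.1))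
    || decide (bp.2 + 1 > prev.2)
    || (PySem.Dict.get? nxt bp.2).any (fun s => decide (s < prev.2))

def parse_pseudoknot_py_alt (ctList : List (Int × Int)) : List (List (Int × Int)) :=
  let pairs := (PySem.List.sorted ctList (fun x => x.1) false).filter (fun it => decide (it.1 < it.2))
  let n : Int := PySem.List.len pairs
  let pos := PySem.List.sorted
    (PySem.Set.ofList (pairs.flatMap (fun p => [p.1, p.2]))) (fun x => x) false
  let nxt : PySem.Dict Int Int := PySem.Dict.ofList (pos.zip (PySem.List.slice pos (some 1) none))
  let breaks := (PySem.List.pyRange 1 n 1).filter (fun i =>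
      bCrosses nxt (PySem.List.pyGetD pairs (i-1) (0, 0)) (PySem.List.pyGetD pairs i (0, 0)))
  let bounds := 0 :: breaks ++ [n]
  let duplex := (bounds.zip bounds.tail).map
    (fun ab => PySem.List.slice pairs (some ab.1) (some ab.2))
  let Len : Int := PySem.List.len duplex
  let incompat := (PySem.List.pyRange 0 Len 1).flatMap (fun i =>
      ((PySem.List.pyRange (i+1) Len 1).filter (fun j =>
        let bp1 := PySem.List.pyGetD (PySem.List.pyGetD duplex i []) 0 (0, 0)
        let bp2 := PySem.List.pyGetD (PySem.List.pyGetD duplex j []) 0 (0, 0)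
        decide ((bp1.1 < bp2.1 ∧ bp2.1 < bp1.2 ∧ bp1.2 < bp2.2) ∨
                (bp2.1 < bp1.1 ∧ bp1.1 < bp2.2 ∧ bp2.2 < bp1.2)))).map (fun j => (i, j)))
  (bLoop duplex incompat.length incompat).map (fun i => PySem.List.pyGetD duplex i [])

-- ===== PRECONDITION & SPEC =====
-- Pre_ excludes exactly the inputs with no pair (l, r) with l < r: there the Python A
-- hits ctList[0] on the empty filtered list and raises IndexError.
def Pre_parse_pseudoknot_py (ctList : List (Int × Int)) : Prop :=
  ctList.any (fun it => decide (it.1 < it.2)) = true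
instance (ctList : List (Int × Int)) : Decidable (Pre_parse_pseudoknot_py ctList) := by
  unfold Pre_parse_pseudoknot_py; infer_instance
def pvWitness_parse_pseudoknot_py : (List (Int × Int)) := [(3, 8), (4, 7)]

def Spec_parse_pseudoknot_py (ctList : List (Int × Int)) (out : List (List (Int × Int))) : Prop := out = parse_pseudoknot_py_alt ctList
instance (ctList : List (Int × Int)) (out : List (List (Int × Int))) : Decidable (Spec_parse_pseudoknot_py ctList out) := by unfold Spec_parse_pseudoknot_py; infer_instance

-- ===== CLAIM (what is proved, stated in full; the proofs are below) =====
def Claim_equal_parse_pseudoknot_py : Prop := ∀ (ctList : List (Int × Int)), Dom_parse_pseudoknot_py ctList → Pre_parse_pseudoknot_py ctList → Spec_parse_pseudoknot_py ctList (parse_pseudoknot_py ctList)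

-- ===== LEMMAS AND PROOFS =====

-- ---------- selection phase: A's sort-and-take-last equals B's one-pass last-arg-max ----------

theorem pv_insertBy_ne_nil {α : Type} (before : α → α → Bool) (x : α) (ys : List α) :
    PySem.List.insertBy before x ys ≠ [] := by
  cases ys with
  | nil => simp [PySem.List.insertBy]
  | cons y t => simp only [PySem.List.insertBy]; split <;> simp

theorem pv_getLast?_cons_ne {α : Type} (y : α) (t : List α) (h : t ≠ []) :
    (y :: t).getLast? = t.getLast? := by
  cases t with
  | nil => exact absurd rfl h
  | cons z t' => simp [List.getLast?_cons_cons]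

theorem pv_getLast?_insertBy {α : Type} (before : α → α → Bool) (x : α) (ys : List α) :
    (PySem.List.insertBy before x ys).getLast? =
      if ys.any (fun y => before x y) then ys.getLast? else some x := by
  induction ys with
  | nil => simp [PySem.List.insertBy]
  | cons y t ih =>
    simp only [PySem.List.insertBy, List.any_cons]
    by_cases h : before x y = true
    · simp only [h, Bool.true_or, if_true]
      cases t with
      | nil => simp
      | cons z t' => simp [List.getLast?_cons_cons]
    · simp only [h, Bool.false_or, Bool.false_eq_true, if_false]
      rw [pv_getLast?_cons_ne _ _ (pv_insertBy_ne_nil before x t), ih]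
      cases t with
      | nil => simp [PySem.List.insertBy]
      | cons z t' =>
        by_cases h2 : ((z :: t').any fun y => before x y) = true
        · simp only [h2, if_true]
          rw [pv_getLast?_cons_ne y (z::t') (by simp)]
        · simp [h2]

def pvLt {α : Type} (K1 K2 : α → Int) (a b : α) : Bool :=
  decide (K1 a < K1 b) || (!decide (K1 b < K1 a) && decide (K2 a < K2 b))

theorem pvLt_total {α : Type} (K1 K2 : α → Int) (x m y : α)
    (h1 : pvLt K1 K2 x y = true) (h2 : pvLt K1 K2 m y = false) : pvLt K1 K2 x m = true := by
  simp [pvLt] at *; omega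

theorem pvLt_asymm {α : Type} (K1 K2 : α → Int) (x y : α)
    (h1 : pvLt K1 K2 x y = true) : pvLt K1 K2 y x = false := by
  simp [pvLt] at *; omega

theorem pvLt_trans {α : Type} (K1 K2 : α → Int) (x y z : α)
    (h1 : pvLt K1 K2 x y = true) (h2 : pvLt K1 K2 y z = true) : pvLt K1 K2 x z = true := by
  simp [pvLt] at *; omega

theorem pv_pairwise_insertBy {α : Type} (K1 K2 : α → Int) (x : α) (ys : List α)
    (h : ys.Pairwise (fun a b => pvLt K1 K2 b a = false)) :
    (PySem.List.insertBy (pvLt K1 K2) x ys).Pairwise (fun a b => pvLt K1 K2 b a = false) := by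
  induction ys with
  | nil => simp [PySem.List.insertBy]
  | cons y t ih =>
    simp only [PySem.List.insertBy]
    rcases List.pairwise_cons.mp h with ⟨hy, ht⟩
    by_cases hb : pvLt K1 K2 x y = true
    · rw [if_pos hb]
      refine List.pairwise_cons.mpr ⟨?_, h⟩
      intro z hz
      rcases List.mem_cons.mp hz with rfl | hz
      · exact pvLt_asymm K1 K2 x z hb
      · by_contra hc
        simp only [Bool.not_eq_false] at hc
        have hzy : pvLt K1 K2 z y = true := pvLt_trans K1 K2 z x y hc hb
        have := hy z hz
        simp_all
    · rw [if_neg hb]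
      refine List.pairwise_cons.mpr ⟨?_, ih ht⟩
      intro z hz
      rw [PySem.List.mem_insertBy] at hz
      rcases hz with rfl | hz
      · simpa using hb
      · exact hy z hz

def pvG {α : Type} (K1 K2 : α → Int) (b : Option α) (x : α) : Option α :=
  if b.all (fun m => !(pvLt K1 K2 x m)) then some x else b

theorem pv_last_max {α : Type} (K1 K2 : α → Int) (ys : List α) (m : α)
    (h : ys.Pairwise (fun a b => pvLt K1 K2 b a = false)) (hm : ys.getLast? = some m) :
    ∀ y ∈ ys, y = m ∨ pvLt K1 K2 m y = false := by
  induction ys with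
  | nil => simp at hm
  | cons y t ih =>
    intro z hz
    cases t with
    | nil =>
      simp at hm hz; subst hm; subst hz; left; rfl
    | cons w t' =>
      rw [pv_getLast?_cons_ne y (w::t') (by simp)] at hm
      rcases List.pairwise_cons.mp h with ⟨hy, ht⟩
      rcases List.mem_cons.mp hz with rfl | hz
      · right
        exact hy m (List.mem_of_getLast? hm)
      · exact ih ht hm z hz

theorem pv_getLast?_insert_step {α : Type} (K1 K2 : α → Int) (x : α) (ys : List α)
    (h : ys.Pairwise (fun a b => pvLt K1 K2 b a = false)) :
    (PySem.List.insertBy (pvLt K1 K2) x ys).getLast? = pvG K1 K2 ys.getLast? x := by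
  rw [pv_getLast?_insertBy]
  cases hm : ys.getLast? with
  | none =>
    have : ys = [] := by
      cases ys with
      | nil => rfl
      | cons a t => simp [List.getLast?_eq_some_getLast] at hm
    subst this; simp [pvG]
  | some m =>
    have hmm : m ∈ ys := List.mem_of_getLast? hm
    by_cases hx : pvLt K1 K2 x m = true
    · have hany : ys.any (fun y => pvLt K1 K2 x y) = true := List.any_eq_true.mpr ⟨m, hmm, hx⟩
      simp [pvG, hany, hx]
    · have hany : ys.any (fun y => pvLt K1 K2 x y) = false := by
        rw [List.any_eq_false]
        intro y hy
        rcases pv_last_max K1 K2 ys m h hm y hy with rfl | hmy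
        · simpa using hx
        · intro hc
          exact hx (pvLt_total K1 K2 x m y hc hmy)
      simp [pvG, hany, hx]

theorem pv_getLast?_sortfold {α : Type} (K1 K2 : α → Int) (l : List α) (acc : List α)
    (h : acc.Pairwise (fun a b => pvLt K1 K2 b a = false)) :
    (l.foldl (fun acc x => PySem.List.insertBy (pvLt K1 K2) x acc) acc).getLast? =
      l.foldl (pvG K1 K2) acc.getLast? := by
  induction l generalizing acc with
  | nil => rfl
  | cons x t ih =>
    simp only [List.foldl_cons]
    rw [ih _ (pv_pairwise_insertBy K1 K2 x acc h), pv_getLast?_insert_step K1 K2 x acc h]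

theorem pv_bfold_eq (duplex : List (List (Int × Int))) (l : List (Int × Int))
    (b : Option (Int × Int)) :
    l.foldl (fun (b : Option (Int × (Int × Int))) (it : Int × Int) =>
        let key : Int × Int := (it.2, -((PySem.List.pyGetD duplex it.1 []).length : Int))
        if b.all (fun bv => decide (bv.2.1 < key.1 ∨ (bv.2.1 = key.1 ∧ bv.2.2 ≤ key.2)))
        then some (it.1, key) else b)
      (b.map (fun m => (m.1, (m.2, -((PySem.List.pyGetD duplex m.1 []).length : Int)))))
    = (l.foldl (pvG (fun x : Int × Int => x.2)
        (fun x => -((PySem.List.pyGetD duplex x.1 []).length : Int))) b).map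
        (fun m => (m.1, (m.2, -((PySem.List.pyGetD duplex m.1 []).length : Int)))) := by
  induction l generalizing b with
  | nil => rfl
  | cons x t ih =>
    simp only [List.foldl_cons]
    cases b with
    | none =>
      have : pvG (fun x : Int × Int => x.2)
          (fun x => -((PySem.List.pyGetD duplex x.1 []).length : Int)) none x = some x := rfl
      rw [this]
      exact ih (some x)
    | some m =>
      simp only [Option.map_some]
      have hcond : ((m.2 : Int) < x.2 ∨ (m.2 : Int) = x.2 ∧
            (-((PySem.List.pyGetD duplex m.1 []).length : Int)) ≤ -((PySem.List.pyGetD duplex x.1 []).length : Int))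
          ↔ ¬ (pvLt (fun y : Int × Int => y.2)
            (fun y => -((PySem.List.pyGetD duplex y.1 []).length : Int)) x m = true) := by
        simp [pvLt]; omega
      by_cases hc : pvLt (fun y : Int × Int => y.2)
          (fun y => -((PySem.List.pyGetD duplex y.1 []).length : Int)) x m = true
      · have h1 : pvG (fun x : Int × Int => x.2)
            (fun x => -((PySem.List.pyGetD duplex x.1 []).length : Int)) (some m) x = some m := by
          simp [pvG, hc]
        rw [h1]
        have h2 : (Option.all (fun bv => decide (bv.2.1 < x.2 ∨ (bv.2.1 = x.2 ∧ bv.2.2 ≤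
            -((PySem.List.pyGetD duplex x.1 []).length : Int))))
            (some (m.1, (m.2, -((PySem.List.pyGetD duplex m.1 []).length : Int))))) = false := by
          simp only [Option.all_some, decide_eq_false_iff_not]
          exact fun hcc => (hcond.mp (by simpa using hcc)) hc
        rw [h2]
        simpa using ih (some m)
      · have h1 : pvG (fun x : Int × Int => x.2)
            (fun x => -((PySem.List.pyGetD duplex x.1 []).length : Int)) (some m) x = some x := by
          simp [pvG, hc]
        rw [h1]
        have h2 : (Option.all (fun bv => decide (bv.2.1 < x.2 ∨ (bv.2.1 = x.2 ∧ bv.2.2 ≤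
            -((PySem.List.pyGetD duplex x.1 []).length : Int))))
            (some (m.1, (m.2, -((PySem.List.pyGetD duplex m.1 []).length : Int))))) = true := by
          simp only [Option.all_some, decide_eq_true_eq]
          simpa using hcond.mpr hc
        rw [h2]
        exact ih (some x)

theorem pv_argmax_isSome {α : Type} (K1 K2 : α → Int) (l : List α) (m : α) :
    (l.foldl (pvG K1 K2) (some m)).isSome := by
  induction l generalizing m with
  | nil => rfl
  | cons x t ih =>
    simp only [List.foldl_cons]
    rcases em ((Option.all (fun mm => !pvLt K1 K2 x mm) (some m)) = true) with hall | hall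
    · rw [show pvG K1 K2 (some m) x = some x from by simp only [pvG]; rw [if_pos hall]]
      exact ih x
    · rw [show pvG K1 K2 (some m) x = some m from by simp only [pvG]; rw [if_neg hall]]
      exact ih m

theorem pv_dict_insert_items_ne_nil {κ ν : Type} [BEq κ] [LawfulBEq κ] (d : PySem.Dict κ ν) (k : κ) (v : ν) :
    (PySem.Dict.insert d k v).items ≠ [] := by
  by_cases h : d.contains k = true
  · have hne : d.items ≠ [] := by
      intro hnil
      rw [PySem.Dict.contains_iff_mem_keys] at h
      simp only [PySem.Dict.keys, hnil] at h
      simp at h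
    simp only [PySem.Dict.insert, h, if_true]
    simpa using hne
  · simp only [PySem.Dict.insert, h]
    simp

theorem pv_count_items_ne_nil (pairs : List (Int × Int)) (hne : pairs ≠ []) :
    (pairs.foldl (fun d p =>
        let d1 := PySem.Dict.insert d p.1 (PySem.Dict.getD d p.1 0 + 1)
        PySem.Dict.insert d1 p.2 (PySem.Dict.getD d1 p.2 0 + 1))
      (PySem.Dict.empty : PySem.Dict Int Int)).items ≠ [] := by
  have step : ∀ (l : List (Int × Int)) (d : PySem.Dict Int Int), d.items ≠ [] →
      (l.foldl (fun d p =>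
        let d1 := PySem.Dict.insert d p.1 (PySem.Dict.getD d p.1 0 + 1)
        PySem.Dict.insert d1 p.2 (PySem.Dict.getD d1 p.2 0 + 1)) d).items ≠ [] := by
    intro l
    induction l with
    | nil => intro d h; exact h
    | cons p t ih => intro d h; exact ih _ (pv_dict_insert_items_ne_nil _ _ _)
  cases pairs with
  | nil => exact absurd rfl hne
  | cons p t => exact step t _ (pv_dict_insert_items_ne_nil _ _ _)

-- B's counter over the flattened pair list is A's two-insert counter over the pairs.
theorem pv_flat_count (pairs : List (Int × Int)) (d : PySem.Dict Int Int) :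
    (pairs.flatMap (fun p => [p.1, p.2])).foldl (fun d x =>
        PySem.Dict.insert d x (PySem.Dict.getD d x 0 + 1)) d
    = pairs.foldl (fun d p =>
        let d1 := PySem.Dict.insert d p.1 (PySem.Dict.getD d p.1 0 + 1)
        PySem.Dict.insert d1 p.2 (PySem.Dict.getD d1 p.2 0 + 1)) d := by
  induction pairs generalizing d with
  | nil => rfl
  | cons p t ih => simp only [List.flatMap_cons, List.foldl_append, List.foldl_cons]; exact ih _

theorem pv_round (duplex : List (List (Int × Int))) (items : List (Int × Int)) (hne : items ≠ []) :
    ∃ key, items.foldl (fun (b : Option (Int × (Int × Int))) (it : Int × Int) =>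
        let key : Int × Int := (it.2, -((PySem.List.pyGetD duplex it.1 []).length : Int))
        if b.all (fun bv => decide (bv.2.1 < key.1 ∨ (bv.2.1 = key.1 ∧ bv.2.2 ≤ key.2)))
        then some (it.1, key) else b) none
    = some ((PySem.List.pyGetD (PySem.List.sorted2 items (fun x => x.2)
        (fun x => -((PySem.List.pyGetD duplex x.1 []).length : Int)) false) (-1) ((0:Int),(0:Int))).1, key) := by
  set K1 : Int × Int → Int := fun x => x.2 with hK1
  set K2 : Int × Int → Int := fun x => -((PySem.List.pyGetD duplex x.1 []).length : Int) with hK2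
  have hsort2 : PySem.List.sorted2 items K1 K2 false =
      items.foldl (fun acc x => PySem.List.insertBy (pvLt K1 K2) x acc) [] := rfl
  have hlast : (PySem.List.sorted2 items K1 K2 false).getLast? =
      items.foldl (pvG K1 K2) none := by
    rw [hsort2, pv_getLast?_sortfold K1 K2 items [] (by simp)]
    simp
  have hsome : (items.foldl (pvG K1 K2) none).isSome := by
    cases items with
    | nil => exact absurd rfl hne
    | cons x t =>
      simp only [List.foldl_cons]
      have : pvG K1 K2 none x = some x := rfl
      rw [this]
      exact pv_argmax_isSome K1 K2 t x
  obtain ⟨m, hm⟩ := Option.isSome_iff_exists.mp hsome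
  have hs2ne : PySem.List.sorted2 items K1 K2 false ≠ [] := by
    intro hnil
    have hp := PySem.List.sorted2_perm (xs := items) (k1 := K1) (k2 := K2) (rev := false)
    rw [hnil] at hp
    exact hne (List.Perm.nil_eq hp).symm
  have hgetD : PySem.List.pyGetD (PySem.List.sorted2 items K1 K2 false) (-1) ((0:Int),(0:Int)) = m := by
    rw [PySem.List.pyGetD_neg_one (h := hs2ne)]
    have h2 := hlast
    rw [hm, List.getLast?_eq_some_getLast (h := hs2ne)] at h2
    exact Option.some.inj h2.symm |>.symm
  have hb := pv_bfold_eq duplex items none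
  simp only [Option.map_none] at hb
  refine ⟨(m.2, -((PySem.List.pyGetD duplex m.1 []).length : Int)), ?_⟩
  rw [hb, hm, hgetD]
  simp

theorem pv_loop_eq (duplex : List (List (Int × Int))) (fuel : Nat) :
    ∀ (pairs : List (Int × Int)) (acc : List Int),
      aWhile duplex fuel pairs acc = acc ++ bLoop duplex fuel pairs := by
  induction fuel with
  | zero => intro pairs acc; simp [aWhile, bLoop]
  | succ f ih =>
    intro pairs acc
    by_cases hp : pairs.isEmpty
    · simp only [aWhile, bLoop, hp, if_true]
      simp
    · simp only [aWhile, bLoop, hp]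
      have hpne : pairs ≠ [] := by simpa [List.isEmpty_iff] using hp
      rw [pv_flat_count]
      obtain ⟨key, hk⟩ := pv_round duplex
        (pairs.foldl (fun d p =>
          let d1 := PySem.Dict.insert d p.1 (PySem.Dict.getD d p.1 0 + 1)
          PySem.Dict.insert d1 p.2 (PySem.Dict.getD d1 p.2 0 + 1))
          (PySem.Dict.empty : PySem.Dict Int Int)).items
        (pv_count_items_ne_nil pairs hpne)
      rw [hk]
      rw [ih]
      simp

-- ---------- bulge tests: the successor-map lookup equals A's integer scan ----------

theorem pv_pairfold_eq (ct : List (Int × Int)) :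
    ct.foldl (fun s p => PySem.Set.add (PySem.Set.add s p.1) p.2) PySem.Set.empty
      = PySem.Set.ofList (ct.flatMap (fun p => [p.1, p.2])) := by
  have h : ∀ (s : PySem.Set Int),
      ct.foldl (fun s p => PySem.Set.add (PySem.Set.add s p.1) p.2) s
        = (ct.flatMap (fun p => [p.1, p.2])).foldl PySem.Set.add s := by
    induction ct with
    | nil => intro s; rfl
    | cons p t ih => intro s; simp only [List.foldl_cons, List.flatMap_cons]; rw [ih]; rfl
  rw [h, PySem.Set.ofList_eq_foldl]
  rfl

theorem pv_zip_map_fst {α : Type} (l : List α) : (l.zip l.tail).map Prod.fst = l.dropLast := by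
  induction l with
  | nil => rfl
  | cons x t ih =>
    cases t with
    | nil => rfl
    | cons y t' =>
      simp only [List.tail_cons, List.zip_cons_cons, List.map_cons]
      rw [show (y :: t').zip t' = (y :: t').zip (y :: t').tail from rfl, ih]
      simp [List.dropLast_cons_of_ne_nil]

theorem pv_nxt_items (l : List Int) (hnd : l.Nodup) :
    (PySem.Dict.ofList (l.zip l.tail) : PySem.Dict Int Int).items = l.zip l.tail := by
  have hkeys : ((l.zip l.tail).map Prod.fst).Nodup := by
    rw [pv_zip_map_fst]; exact hnd.sublist (List.dropLast_sublist l)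
  have h := PySem.Dict.items_foldl_insert_fresh (l := l.zip l.tail)
      (k := Prod.fst) (v := Prod.snd) (d := (PySem.Dict.empty : PySem.Dict Int Int))
      (by intro a _; rfl) hkeys
  simpa [PySem.Dict.ofList, PySem.Dict.update] using h

theorem pv_succ_find (l : List Int) (hs : l.Pairwise (· < ·)) (a b : Int) (ha : a ∈ l) :
    ((((l.zip l.tail).find? (fun p => p.1 == a)).map (fun p => p.2)).any (fun s => decide (s < b)))
      = decide (∃ x ∈ l, a < x ∧ x < b) := by
  induction l with
  | nil => simp at ha
  | cons x t ih =>
    cases t with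
    | nil =>
      simp at ha
      subst ha
      simp
    | cons y t' =>
      rcases List.pairwise_cons.mp hs with ⟨hx, hs'⟩
      by_cases hax : a = x
      · subst hax
        simp only [List.tail_cons, List.zip_cons_cons]
        rw [List.find?_cons_of_pos (h := by simp)]
        simp only [Option.map_some, Option.any_some]
        have hy : a < y := hx y (by simp)
        rcases (by omega : y < b ∨ b ≤ y) with hyb | hyb
        · have : ∃ x_1 ∈ a :: y :: t', a < x_1 ∧ x_1 < b := ⟨y, by simp, hy, hyb⟩
          simp [hyb]
          exact Or.inl hy
        · have : ¬ ∃ x_1 ∈ a :: y :: t', a < x_1 ∧ x_1 < b := by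
            rintro ⟨z, hz, haz, hzb⟩
            rcases List.mem_cons.mp hz with rfl | hz
            · omega
            · have : y ≤ z := by
                rcases List.mem_cons.mp hz with rfl | hz
                · omega
                · have := (List.pairwise_cons.mp hs').1 z hz; omega
              omega
          simp only [this, decide_false]
          simp; omega
      · have ham : a ∈ y :: t' := by
          rcases List.mem_cons.mp ha with rfl | h
          · exact absurd rfl hax
          · exact h
        have hxa : x < a := hx a ham
        simp only [List.tail_cons, List.zip_cons_cons]
        rw [List.find?_cons_of_neg (h := by simp; omega)]
        rw [show (y :: t').zip t' = (y :: t').zip (y :: t').tail from rfl]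
        rw [ih hs' ham]
        have : (∃ z ∈ y :: t', a < z ∧ z < b) ↔ (∃ z ∈ x :: y :: t', a < z ∧ z < b) := by
          constructor
          · rintro ⟨z, hz, h1, h2⟩; exact ⟨z, by simp [hz], h1, h2⟩
          · rintro ⟨z, hz, h1, h2⟩
            rcases List.mem_cons.mp hz with rfl | hz
            · omega
            · exact ⟨z, hz, h1, h2⟩
        simp only [this]

theorem pv_scan_eq (P : PySem.Set Int) (a b : Int) :
    ((PySem.List.pyRange (a+1) b 1).any (fun li => PySem.Set.contains P li))
      = decide (∃ x ∈ P, a < x ∧ x < b) := by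
  by_cases h : ∃ x ∈ P, a < x ∧ x < b
  · obtain ⟨x, hx, h1, h2⟩ := h
    have hl : ((PySem.List.pyRange (a+1) b 1).any (fun li => PySem.Set.contains P li)) = true :=
      List.any_eq_true.mpr ⟨x, by rw [PySem.List.mem_pyRange_one]; omega,
        by simpa [PySem.Set.contains_iff] using hx⟩
    rw [hl, (decide_eq_true (p := ∃ x ∈ P, a < x ∧ x < b) ⟨x, hx, h1, h2⟩).symm]
  · have hl : ((PySem.List.pyRange (a+1) b 1).any (fun li => PySem.Set.contains P li)) = false := by
      rw [List.any_eq_false]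
      intro li hli hc
      rw [PySem.List.mem_pyRange_one] at hli
      rw [PySem.Set.contains_iff] at hc
      exact h ⟨li, hc, by omega, by omega⟩
    rw [hl, decide_eq_false h]

theorem pv_lookup (flat : List Int) (a b : Int) (ha : a ∈ flat) :
    (PySem.Dict.get? (PySem.Dict.ofList
        ((PySem.List.sorted (PySem.Set.ofList flat) (fun x => x) false).zip
          (PySem.List.slice (PySem.List.sorted (PySem.Set.ofList flat) (fun x => x) false) (some 1) none))
        : PySem.Dict Int Int) a).any (fun s => decide (s < b))
      = ((PySem.List.pyRange (a+1) b 1).any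
          (fun li => PySem.Set.contains (PySem.Set.ofList flat) li)) := by
  set pos := PySem.List.sorted (PySem.Set.ofList flat) (fun x => x) false with hpos
  have hperm : pos.Perm (PySem.Set.ofList flat) := PySem.List.sorted_perm _ _ _
  have hnd : pos.Nodup := hperm.nodup_iff.mpr (PySem.Set.nodup_ofList flat)
  have hle : pos.Pairwise (fun x y => x ≤ y) := PySem.List.sorted_pairwise _ _
  have hlt : pos.Pairwise (· < ·) := by
    have hne := List.Nodup.pairwise_of_forall_ne hnd (by intro x hx y hy h; exact h)
    exact (hle.and hne).imp (fun h => lt_of_le_of_ne h.1 h.2)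
  have hmem : ∀ x : Int, x ∈ pos ↔ x ∈ flat := by
    intro x
    rw [hperm.mem_iff, PySem.Set.mem_ofList]
  rw [PySem.List.slice_from_one]
  have hitems := pv_nxt_items pos hnd
  rw [pv_scan_eq]
  simp only [PySem.Dict.get?, hitems]
  rw [pv_succ_find pos hlt a b ((hmem a).mpr ha)]
  congr 1
  apply propext
  constructor
  · rintro ⟨x, hx, h1, h2⟩; exact ⟨x, hperm.mem_iff.mp hx, h1, h2⟩
  · rintro ⟨x, hx, h1, h2⟩; exact ⟨x, hperm.mem_iff.mpr hx, h1, h2⟩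

-- ---------- grouping phase: A's accumulator fold equals B's slices between breaks ----------

def pvStepN {α : Type} (ct : List α) (d : α) (gN : Nat → Bool)
    (st : List (List α) × List α) (k : Nat) : List (List α) × List α :=
  if gN k then (st.1 ++ [st.2], [ct.getD (k+1) d]) else (st.1, st.2 ++ [ct.getD (k+1) d])

def pvBnds (gN : Nat → Bool) (m : Nat) : List Nat := ((List.range m).filter gN).map (· + 1)

theorem pv_lastD_le (l : List Nat) (b : Nat) (d : Nat) (hd : d ≤ b) (h : ∀ x ∈ l, x ≤ b) :
    l.getLastD d ≤ b := by
  induction l generalizing d with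
  | nil => exact hd
  | cons x t ih =>
    rw [List.getLastD_cons]
    exact ih x (h x (by simp)) (fun y hy => h y (by simp [hy]))

theorem pv_zip_tail_append {α : Type} (l : List α) (x d : α) (h : l ≠ []) :
    (l ++ [x]).zip (l ++ [x]).tail = l.zip l.tail ++ [(l.getLastD d, x)] := by
  induction l generalizing d with
  | nil => exact absurd rfl h
  | cons y t ih =>
    cases t with
    | nil => simp
    | cons z t' =>
      have hih := ih (d := d) (by simp)
      simp only [List.cons_append, List.tail_cons, List.zip_cons_cons] at hih ⊢
      rw [hih]
      have h1 : (y :: z :: t').getLastD d = (z :: t').getLastD d := by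
        rw [List.getLastD_eq_getLast?, List.getLastD_eq_getLast?, List.getLast?_cons_cons]
      rw [h1]

theorem pv_drop_take_one {α : Type} (ct : List α) (k : Nat) (d : α) (hk : k < ct.length) :
    (ct.drop k).take 1 = [ct.getD k d] := by
  induction ct generalizing k with
  | nil => simp at hk
  | cons c t ih =>
    cases k with
    | zero => simp
    | succ k' => simpa using ih k' (by simpa using hk)

theorem pv_take_push {α : Type} (ct : List α) (L j : Nat) (d : α) (hj : L + j < ct.length) :
    (ct.drop L).take j ++ [ct.getD (L + j) d] = (ct.drop L).take (j + 1) := by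
  rw [List.take_add_one]
  have h1 : (ct.drop L)[j]? = some ct[L + j] := by
    rw [List.getElem?_drop]
    exact List.getElem?_eq_getElem hj
  rw [h1]
  rw [List.getD_eq_getElem ct d hj]
  rfl

theorem pv_grp {α : Type} (ct : List α) (d : α) (gN : Nat → Bool) (m : Nat)
    (hm : m + 1 ≤ ct.length) :
    (List.range m).foldl (pvStepN ct d gN) ([], [ct.getD 0 d]) =
      ( ((0 :: pvBnds gN m).zip (0 :: pvBnds gN m).tail).map
          (fun ab => (ct.drop ab.1).take (ab.2 - ab.1)),
        (ct.drop ((pvBnds gN m).getLastD 0)).take (m + 1 - (pvBnds gN m).getLastD 0) ) := by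
  induction m with
  | zero =>
    have h0 := pv_drop_take_one ct 0 d (by omega)
    simp only [List.drop_zero] at h0
    simp [pvBnds, h0]
  | succ m ih =>
    have hm' : m + 1 ≤ ct.length := by omega
    have hL : (pvBnds gN m).getLastD 0 ≤ m := by
      apply pv_lastD_le _ _ _ (by omega)
      intro x hx
      simp only [pvBnds, List.mem_map, List.mem_filter, List.mem_range] at hx
      obtain ⟨k, ⟨hk, _⟩, rfl⟩ := hx
      omega
    rw [List.range_succ, List.foldl_append, ih hm', List.foldl_cons, List.foldl_nil]
    have hbnds : pvBnds gN (m+1) = pvBnds gN m ++ (if gN m then [m+1] else []) := by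
      simp only [pvBnds, List.range_succ, List.filter_append, List.map_append]
      congr 1
      by_cases hg : gN m = true <;> simp [hg]
    by_cases hg : gN m = true
    · simp only [pvStepN, hg, if_true, hbnds]
      have hzip := pv_zip_tail_append (0 :: pvBnds gN m) (m+1) 0 (by simp)
      simp only [List.cons_append] at hzip
      rw [hzip, List.map_append]
      have hlast : (0 :: pvBnds gN m).getLastD 0 = (pvBnds gN m).getLastD 0 := by
        cases h : pvBnds gN m with
        | nil => simp
        | cons a t => simp [List.getLastD_eq_getLast?]
      rw [hlast]
      simp only [Prod.mk.injEq]
      refine ⟨by simp, ?_⟩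
      rw [List.getLastD_concat]
      have harith : m + 1 + 1 - (m + 1) = 1 := by omega
      rw [harith, pv_drop_take_one ct (m+1) d (by omega)]
    · have hgf : gN m = false := by simpa using hg
      simp only [pvStepN, hgf, Bool.false_eq_true, if_false, hbnds, List.append_nil]
      simp only [Prod.mk.injEq]
      refine ⟨trivial, ?_⟩
      · have hj : (pvBnds gN m).getLastD 0 + (m + 1 - (pvBnds gN m).getLastD 0) < ct.length := by
          omega
        have := pv_take_push ct ((pvBnds gN m).getLastD 0) (m + 1 - (pvBnds gN m).getLastD 0) d hj
        rw [show (pvBnds gN m).getLastD 0 + (m + 1 - (pvBnds gN m).getLastD 0) = m + 1 from by omega] at this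
        rw [this]
        congr 1
        omega

theorem pv_fold_slices {α : Type} (c0 : α) (rest : List α) (d : α) (g : Int → Bool) :
    (let ct := c0 :: rest
     let res := (PySem.List.pyRange 1 (PySem.List.len ct) 1).foldl
       (fun (st : List (List α) × List α) (i : Int) =>
         if g i then (st.1 ++ [st.2], [PySem.List.pyGetD ct i d])
         else (st.1, st.2 ++ [PySem.List.pyGetD ct i d])) ([], [c0])
     (if res.2.isEmpty then res.1 else res.1 ++ [res.2]))
    = (let ct := c0 :: rest
       let bounds := 0 :: (PySem.List.pyRange 1 (PySem.List.len ct) 1).filter g ++ [PySem.List.len ct]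
       (bounds.zip bounds.tail).map (fun ab => PySem.List.slice ct (some ab.1) (some ab.2))) := by
  dsimp only
  set ct := c0 :: rest with hct
  set gN : Nat → Bool := fun k => g (1 + (k : Int)) with hgN
  have hlen : PySem.List.len ct = ((rest.length + 1 : Nat) : Int) := by
    rw [PySem.List.len_eq]; simp [hct]
  have hrange : PySem.List.pyRange 1 (PySem.List.len ct) 1
      = (List.range rest.length).map (fun k => (1 : Int) + (k : Nat)) := by
    rw [PySem.List.pyRange_one, hlen]
    have h3 : ((rest.length + 1 : Nat) : Int) - 1 = (rest.length : Int) := by push_cast; ring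
    rw [h3, Int.toNat_natCast]
  have hL : (pvBnds gN rest.length).getLastD 0 ≤ rest.length := by
    apply pv_lastD_le _ _ _ (by omega)
    intro x hx
    simp only [pvBnds, List.mem_map, List.mem_filter, List.mem_range] at hx
    obtain ⟨k, ⟨hk, _⟩, rfl⟩ := hx
    omega
  -- LHS: index fold = Nat-level fold, then pv_grp
  have hbody : (fun (st : List (List α) × List α) (k : Nat) =>
        (fun (st : List (List α) × List α) (i : Int) =>
          if g i then (st.1 ++ [st.2], [PySem.List.pyGetD ct i d])
          else (st.1, st.2 ++ [PySem.List.pyGetD ct i d])) st ((1 : Int) + (k : Nat)))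
      = pvStepN ct d gN := by
    funext st k
    have h2 : ((1 : Int) + (k : Nat)) = (((k + 1 : Nat)) : Int) := by push_cast; omega
    simp only [pvStepN, hgN, h2, PySem.List.pyGetD_natCast]
  have hgrp := pv_grp ct d gN rest.length (by simp [hct])
  -- RHS: Int bounds are the Nat bounds, cast
  have hpred : (g ∘ fun k : Nat => (1 : Int) + (k : Nat)) = gN := by
    funext k; simp [hgN, Function.comp]
  have hfilter : (PySem.List.pyRange 1 (PySem.List.len ct) 1).filter g
      = (pvBnds gN rest.length).map (fun a : Nat => (a : Int)) := by
    rw [hrange, List.filter_map, hpred]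
    simp only [pvBnds, List.map_map]
    congr 1
    funext k
    simp only [Function.comp_apply]
    push_cast
    omega
  have hbounds : (0 : Int) :: (PySem.List.pyRange 1 (PySem.List.len ct) 1).filter g ++ [PySem.List.len ct]
      = ((0 :: pvBnds gN rest.length ++ [rest.length + 1]).map (fun a : Nat => (a : Int))) := by
    rw [hfilter, hlen]
    simp
  rw [hbounds]
  rw [hrange, List.foldl_map, hbody]
  rw [show ((([] : List (List α)), [c0]) : List (List α) × List α) = ([], [ct.getD 0 d]) from rfl]
  rw [hgrp]
  have hne : ((ct.drop ((pvBnds gN rest.length).getLastD 0)).take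
      (rest.length + 1 - (pvBnds gN rest.length).getLastD 0)).isEmpty = false := by
    rw [List.isEmpty_eq_false_iff, ← List.length_pos_iff, List.length_take, List.length_drop]
    simp only [hct, List.length_cons]
    omega
  simp only [hne, Bool.false_eq_true, if_false]
  rw [show ((0 :: pvBnds gN rest.length ++ [rest.length + 1]).map (fun a : Nat => (a : Int))).tail
      = (0 :: pvBnds gN rest.length ++ [rest.length + 1]).tail.map (fun a : Nat => (a : Int)) from
      List.map_tail.symm]
  rw [List.zip_map]
  rw [List.map_map]
  have hslice : ((fun ab : Int × Int => PySem.List.slice ct (some ab.1) (some ab.2)) ∘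
        Prod.map (fun a : Nat => (a : Int)) (fun a : Nat => (a : Int)))
      = fun ab : Nat × Nat => (ct.drop ab.1).take (ab.2 - ab.1) := by
    funext ab
    simp only [Function.comp_apply, Prod.map_apply]
    exact PySem.List.slice_natCast ct ab.1 ab.2
  rw [hslice]
  have hzip := pv_zip_tail_append (0 :: pvBnds gN rest.length) (rest.length + 1) 0 (by simp)
  rw [hzip, List.map_append]
  have hlast : ((0 : Nat) :: pvBnds gN rest.length).getLast?.getD 0
      = (pvBnds gN rest.length).getLast?.getD 0 := by
    cases pvBnds gN rest.length with
    | nil => rfl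
    | cons a t => rw [List.getLast?_cons_cons]
  simp [List.getLastD_eq_getLast?, hlast]

theorem pv_nested_eq (cond : Int → Int → Prop) [inst : ∀ i j, Decidable (cond i j)] (L : Int) :
    (PySem.List.pyRange 0 L 1).foldl (fun acc i =>
        (PySem.List.pyRange (i+1) L 1).foldl (fun acc2 j =>
          if cond i j then acc2 ++ [(i, j)] else acc2) acc) []
      = (PySem.List.pyRange 0 L 1).flatMap (fun i =>
          ((PySem.List.pyRange (i+1) L 1).filter (fun j => decide (cond i j))).map (fun j => (i, j))) := by
  have hbody : (fun (acc : List (Int × Int)) (i : Int) =>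
        (PySem.List.pyRange (i+1) L 1).foldl (fun acc2 j =>
          if cond i j then acc2 ++ [(i, j)] else acc2) acc)
      = (fun acc i => acc ++ ((PySem.List.pyRange (i+1) L 1).filter
          (fun j => decide (cond i j))).map (fun j => (i, j))) := by
    funext acc i
    rw [PySem.List.foldl_append_ite]
  rw [hbody, PySem.List.foldl_append_eq_flatMap]
  simp

theorem pv_main (ctList : List (Int × Int))
    (hpre : ctList.any (fun it => decide (it.1 < it.2)) = true) :
    parse_pseudoknot_py ctList = parse_pseudoknot_py_alt ctList := by
  unfold parse_pseudoknot_py parse_pseudoknot_py_alt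
  cases hct : (PySem.List.sorted ctList (fun x => x.1) false).filter (fun it => decide (it.1 < it.2)) with
  | nil =>
    exfalso
    obtain ⟨it, hit, hlt⟩ := List.any_eq_true.mp hpre
    have hmem : it ∈ PySem.List.sorted ctList (fun x => x.1) false :=
      (PySem.List.sorted_perm _ _ _).mem_iff.mpr hit
    have : it ∈ (PySem.List.sorted ctList (fun x => x.1) false).filter (fun it => decide (it.1 < it.2)) :=
      List.mem_filter.mpr ⟨hmem, hlt⟩
    rw [hct] at this
    simp at this
  | cons c0 rest =>
    dsimp only
    -- the successor-dict bulge test of B, as a predicate on the index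
    have hcong : (PySem.List.pyRange 1 (PySem.List.len (c0 :: rest)) 1).foldl
        (fun (st : List (List (Int × Int)) × List (Int × Int)) (i : Int) =>
          let prev := PySem.List.pyGetD (c0 :: rest) (i-1) (0, 0)
          let cur := PySem.List.pyGetD (c0 :: rest) i (0, 0)
          let bulge1 := (PySem.List.pyRange (prev.1+1) cur.1 1).any
            (fun li => PySem.Set.contains ((c0 :: rest).foldl
              (fun s p => PySem.Set.add (PySem.Set.add s p.1) p.2) PySem.Set.empty) li)
          let bulge := if cur.2 + 1 > prev.2 then true
            else bulge1 || (PySem.List.pyRange (cur.2+1) prev.2 1).any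
              (fun ri => PySem.Set.contains ((c0 :: rest).foldl
                (fun s p => PySem.Set.add (PySem.Set.add s p.1) p.2) PySem.Set.empty) ri)
          if bulge then (st.1 ++ [st.2], [cur]) else (st.1, st.2 ++ [cur])) ([], [c0])
      = (PySem.List.pyRange 1 (PySem.List.len (c0 :: rest)) 1).foldl
        (fun (st : List (List (Int × Int)) × List (Int × Int)) (i : Int) =>
          if bCrosses (PySem.Dict.ofList
              ((PySem.List.sorted (PySem.Set.ofList ((c0 :: rest).flatMap (fun p => [p.1, p.2]))) (fun x => x) false).zip
               (PySem.List.slice (PySem.List.sorted (PySem.Set.ofList ((c0 :: rest).flatMap (fun p => [p.1, p.2]))) (fun x => x) false) (some 1) none)))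
              (PySem.List.pyGetD (c0 :: rest) (i-1) (0, 0)) (PySem.List.pyGetD (c0 :: rest) i (0, 0))
          then (st.1 ++ [st.2], [PySem.List.pyGetD (c0 :: rest) i (0, 0)])
          else (st.1, st.2 ++ [PySem.List.pyGetD (c0 :: rest) i (0, 0)])) ([], [c0]) := by
      apply PySem.List.foldl_congr_mem
      intro st i hi
      rw [PySem.List.mem_pyRange_one, PySem.List.len_eq] at hi
      simp only [List.length_cons] at hi
      have hmem1 : PySem.List.pyGetD (c0 :: rest) (i-1) ((0:Int), (0:Int)) ∈ (c0 :: rest) :=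
        PySem.List.pyGetD_mem _ _
          (by simp only [PySem.Raise.InRange, List.length_cons]; push_cast at hi ⊢; omega)
      have hmem2 : PySem.List.pyGetD (c0 :: rest) i ((0:Int), (0:Int)) ∈ (c0 :: rest) :=
        PySem.List.pyGetD_mem _ _
          (by simp only [PySem.Raise.InRange, List.length_cons]; push_cast at hi ⊢; omega)
      have hf1 : (PySem.List.pyGetD (c0 :: rest) (i-1) ((0:Int), (0:Int))).1
          ∈ (c0 :: rest).flatMap (fun p => [p.1, p.2]) :=
        List.mem_flatMap.mpr ⟨_, hmem1, by simp⟩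
      have hf2 : (PySem.List.pyGetD (c0 :: rest) i ((0:Int), (0:Int))).2
          ∈ (c0 :: rest).flatMap (fun p => [p.1, p.2]) :=
        List.mem_flatMap.mpr ⟨_, hmem2, by simp⟩
      dsimp only
      simp only [pv_pairfold_eq, bCrosses]
      simp only [pv_lookup _ _ _ hf1, pv_lookup _ _ _ hf2]
      by_cases hc : (PySem.List.pyGetD (c0 :: rest) i ((0:Int), (0:Int))).2 + 1
          > (PySem.List.pyGetD (c0 :: rest) (i-1) ((0:Int), (0:Int))).2
      · simp only [if_pos hc, decide_eq_true hc]
        simp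
      · simp only [if_neg hc, decide_eq_false hc, Bool.false_or, Bool.or_false]
    rw [hcong]
    have hfs := pv_fold_slices c0 rest ((0:Int), (0:Int))
      (fun i => bCrosses (PySem.Dict.ofList
          ((PySem.List.sorted (PySem.Set.ofList ((c0 :: rest).flatMap (fun p => [p.1, p.2]))) (fun x => x) false).zip
           (PySem.List.slice (PySem.List.sorted (PySem.Set.ofList ((c0 :: rest).flatMap (fun p => [p.1, p.2]))) (fun x => x) false) (some 1) none)))
          (PySem.List.pyGetD (c0 :: rest) (i-1) (0, 0)) (PySem.List.pyGetD (c0 :: rest) i (0, 0)))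
    dsimp only at hfs
    rw [hfs]
    rw [pv_loop_eq]
    rw [pv_nested_eq]
    simp

-- ===== VERDICT (by name: the statement is the Claim_ definition above) =====
theorem parse_pseudoknot_py_spec : Claim_equal_parse_pseudoknot_py := by
  intro ctList _hdom hpre
  show parse_pseudoknot_py ctList = parse_pseudoknot_py_alt ctList
  exact pv_main ctList hpre
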